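-- pv_equiv track=rewrite | github.com/ObKsEm/HRL-RE | code/util/baidu.py | pos_tags_of_sub_sentence
-- ===== SOURCE A (Python) =====
-- def pos_tags_of_sub_sentence(sentence, sub_sentence, pos_tags):
--     start = sentence.find(sub_sentence)
--     end = start + len(sub_sentence)
--     index = 0
--     sub_pos_tags = list()
--     idx = 0
--     for item in pos_tags:
--         word = item.get('item')
--         index += len(word)
--         if start >= index:
--             idx += 1
--         elif index <= end:
--             sub_pos_tags.append(item)
--     return sub_pos_tags, idx
-- ===== SOURCE B (Python) =====
-- def pos_tags_of_sub_sentence(sentence, sub_sentence, pos_tags):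
--     start = sentence.find(sub_sentence)
--     end = start + len(sub_sentence)
--     # prefix table of cumulative character offsets (total length after each word)
--     offsets = []
--     total = 0
--     for item in pos_tags:
--         total += len(item.get('item'))
--         offsets.append(total)
--     idx = sum(1 for off in offsets if off <= start)
--     sub_pos_tags = [item for item, off in zip(pos_tags, offsets) if start < off <= end]
--     return sub_pos_tags, idx
-- ===== Notes on version B (the rewrite author's own statement) =====
-- stated objective: alternative
-- what changed: Replaces A's single interleaved accumulate-and-branch loop by a precomputed cumulative-offset table followed by two independent range filters (a count for idx, a zip-filter for the selected items).
import Mathlib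
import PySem

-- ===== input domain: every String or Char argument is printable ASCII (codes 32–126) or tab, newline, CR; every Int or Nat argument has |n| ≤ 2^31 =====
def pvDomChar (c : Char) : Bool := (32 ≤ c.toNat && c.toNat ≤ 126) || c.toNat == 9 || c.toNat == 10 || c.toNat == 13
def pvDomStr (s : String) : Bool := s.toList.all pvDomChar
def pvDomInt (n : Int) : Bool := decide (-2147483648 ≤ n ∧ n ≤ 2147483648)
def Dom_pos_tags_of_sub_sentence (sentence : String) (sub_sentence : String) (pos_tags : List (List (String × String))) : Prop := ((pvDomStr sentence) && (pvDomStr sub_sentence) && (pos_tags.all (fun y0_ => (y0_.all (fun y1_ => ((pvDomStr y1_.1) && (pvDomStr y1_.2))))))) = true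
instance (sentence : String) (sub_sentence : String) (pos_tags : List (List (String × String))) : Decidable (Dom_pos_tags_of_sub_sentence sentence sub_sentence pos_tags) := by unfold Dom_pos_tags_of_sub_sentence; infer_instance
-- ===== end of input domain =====

-- B computes the same (sub_pos_tags, idx) via a precomputed cumulative-offset table plus two range
-- filters, instead of A's single interleaved accumulate-and-branch loop; equal cost, different shape.

-- ===== PORT A =====
-- one step of A's for-loop; state = (index, sub_pos_tags, idx).  item.get('item') is a first-match
-- assoc-list lookup; Pre_ guarantees the key is present, the .getD "" default is never used there.
def pos_tags_of_sub_sentence (sentence : String) (sub_sentence : String) (pos_tags : List (List (String × String))) : (List (List (String × String))) × Int :=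
  let start := PySem.Str.find sentence sub_sentence
  let stop := start + PySem.Str.len sub_sentence
  let st := pos_tags.foldl
    (fun (s : Int × List (List (String × String)) × Int) item =>
      let word := (List.lookup "item" item).getD ""
      let index := s.1 + PySem.Str.len word
      if start ≥ index then (index, s.2.1, s.2.2 + 1)
      else if index ≤ stop then (index, s.2.1 ++ [item], s.2.2)
      else (index, s.2.1, s.2.2))
    (0, [], 0)
  (st.2.1, st.2.2)

-- ===== PORT B =====
-- Source B's offsets loop (running total, append after each word), as the obvious structural recursion
def altOffsets (total : Int) : List (List (String × String)) → List Int
  | [] => []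
  | item :: rest =>
    let t := total + PySem.Str.len ((List.lookup "item" item).getD "")
    t :: altOffsets t rest

def pos_tags_of_sub_sentence_alt (sentence : String) (sub_sentence : String) (pos_tags : List (List (String × String))) : (List (List (String × String))) × Int :=
  let start := PySem.Str.find sentence sub_sentence
  let stop := start + PySem.Str.len sub_sentence
  let offs := altOffsets 0 pos_tags
  let idx : Int := (offs.countP (fun o => o ≤ start) : Int)
  let sub := ((pos_tags.zip offs).filter (fun p => start < p.2 && p.2 ≤ stop)).map Prod.fst
  (sub, idx)

-- ===== PRECONDITION & SPEC =====
-- Pre_ excludes items missing the 'item' key, where Python's len(None) raises TypeError in A (and in B).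
def Pre_pos_tags_of_sub_sentence (sentence : String) (sub_sentence : String) (pos_tags : List (List (String × String))) : Prop :=
  pos_tags.all (fun item => (List.lookup "item" item).isSome) = true
instance (sentence : String) (sub_sentence : String) (pos_tags : List (List (String × String))) : Decidable (Pre_pos_tags_of_sub_sentence sentence sub_sentence pos_tags) := by unfold Pre_pos_tags_of_sub_sentence; infer_instance

def pvWitness_pos_tags_of_sub_sentence : String × String × (List (List (String × String))) :=
  ("ab cd", "cd", [[("item", "ab"), ("pos", "n")], [("item", " cd"), ("pos", "v")]])

def Spec_pos_tags_of_sub_sentence (sentence : String) (sub_sentence : String) (pos_tags : List (List (String × String))) (out : (List (List (String × String))) × Int) : Prop := out = pos_tags_of_sub_sentence_alt sentence sub_sentence pos_tags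
instance (sentence : String) (sub_sentence : String) (pos_tags : List (List (String × String))) (out : (List (List (String × String))) × Int) : Decidable (Spec_pos_tags_of_sub_sentence sentence sub_sentence pos_tags out) := by unfold Spec_pos_tags_of_sub_sentence; infer_instance

-- ===== CLAIM (what is proved, stated in full; the proofs are below) =====
def Claim_equal_pos_tags_of_sub_sentence : Prop := ∀ (sentence : String) (sub_sentence : String) (pos_tags : List (List (String × String))), Dom_pos_tags_of_sub_sentence sentence sub_sentence pos_tags → Pre_pos_tags_of_sub_sentence sentence sub_sentence pos_tags → Spec_pos_tags_of_sub_sentence sentence sub_sentence pos_tags (pos_tags_of_sub_sentence sentence sub_sentence pos_tags)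

-- ===== LEMMAS AND PROOFS =====

-- A's loop, started at (total, sub, idx), extends sub by B's zip-filter over the offsets from total
-- and adds B's count to idx (the first state component is irrelevant to the result).
theorem loop_eq (start stop : Int) :
    ∀ (l : List (List (String × String))) (total : Int)
      (sub : List (List (String × String))) (idx : Int),
      (l.foldl
        (fun (s : Int × List (List (String × String)) × Int) item =>
          let word := (List.lookup "item" item).getD ""
          let index := s.1 + PySem.Str.len word
          if start ≥ index then (index, s.2.1, s.2.2 + 1)
          else if index ≤ stop then (index, s.2.1 ++ [item], s.2.2)
          else (index, s.2.1, s.2.2))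
        (total, sub, idx)).2
      = (sub ++ ((l.zip (altOffsets total l)).filter (fun p => start < p.2 && p.2 ≤ stop)).map Prod.fst,
         idx + ((altOffsets total l).countP (fun o => o ≤ start) : Int)) := by
  intro l
  induction l with
  | nil => intro total sub idx; simp [altOffsets]
  | cons item rest ih =>
    intro total sub idx
    simp only [List.foldl_cons, altOffsets, List.zip_cons_cons, List.filter_cons,
      List.countP_cons]
    by_cases h1 : start ≥ total + PySem.Str.len ((List.lookup "item" item).getD "")
    · have hle : decide ((total + PySem.Str.len ((List.lookup "item" item).getD "")) ≤ start) = true := by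
        simp [ge_iff_le] at h1 ⊢; omega
      have hlt : (decide (start < total + PySem.Str.len ((List.lookup "item" item).getD "")) &&
          decide ((total + PySem.Str.len ((List.lookup "item" item).getD "")) ≤ stop)) = false := by
        simp [PySem.Str.len_eq, ge_iff_le] at h1 ⊢; omega
      simp only [if_pos h1, hle, hlt, Bool.false_eq_true, if_false, if_true, ih]
      congr 1
      push_cast
      ring
    · have hle : decide ((total + PySem.Str.len ((List.lookup "item" item).getD "")) ≤ start) = false := by
        simp [ge_iff_le] at h1 ⊢; omega
      by_cases h2 : total + PySem.Str.len ((List.lookup "item" item).getD "") ≤ stop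
      · have hlt : (decide (start < total + PySem.Str.len ((List.lookup "item" item).getD "")) &&
            decide ((total + PySem.Str.len ((List.lookup "item" item).getD "")) ≤ stop)) = true := by
          simp [PySem.Str.len_eq, ge_iff_le] at h1 h2 ⊢; omega
        simp only [if_neg h1, if_pos h2, hle, hlt, Bool.false_eq_true, if_false, if_true, ih]
        simp
      · have hlt : (decide (start < total + PySem.Str.len ((List.lookup "item" item).getD "")) &&
            decide ((total + PySem.Str.len ((List.lookup "item" item).getD "")) ≤ stop)) = false := by
          simp [PySem.Str.len_eq, ge_iff_le] at h1 h2 ⊢; omega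
        simp only [if_neg h1, if_neg h2, hle, hlt, Bool.false_eq_true, if_false, ih]
        simp

-- ===== VERDICT (by name: the statement is the Claim_ definition above) =====
theorem pos_tags_of_sub_sentence_spec : Claim_equal_pos_tags_of_sub_sentence := by
  intro sentence sub_sentence pos_tags _ _
  show _ = _
  unfold pos_tags_of_sub_sentence pos_tags_of_sub_sentence_alt
  simp only [loop_eq]
  simp
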